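-- pv_equiv track=rewrite | github.com/DGA-Research/illumis2 | streamlit_app.py | _infer_chamber_from_bill
-- ===== SOURCE A (Python) =====
-- HOUSE_PREFIXES = ("HOUSE", "HJR", "HCR", "HB", "HR", "HC", "HJ", "HS", "H")
--
-- SENATE_PREFIXES = ("SENATE", "SJR", "SCR", "SB", "SR", "SC", "SJ", "SS", "S")
--
-- def _infer_chamber_from_bill(bill_number: str) -> str:
--     token = (bill_number or "").strip().upper()
--     if not token:
--         return ""
--     for prefix in SENATE_PREFIXES:
--         if token.startswith(prefix):
--             return "Senate"
--     for prefix in HOUSE_PREFIXES: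
--         if token.startswith(prefix):
--             return "House"
--     return ""
-- ===== SOURCE B (Python) =====
-- def _infer_chamber_from_bill(bill_number: str) -> str:
--     token = (bill_number or "").strip().upper()
--     if not token:
--         return ""
--     head = token[0]
--     if head == "S":
--         return "Senate"
--     if head == "H":
--         return "House"
--     return ""
-- ===== Notes on version B (the rewrite author's own statement) =====
-- stated objective: simpler
-- what changed: Replaces the two loops over 9-element prefix tuples by a single first-character test: every prefix tuple ends in its one-letter prefix ('S'/'H'), so membership is equivalent to the normalized token starting with that letter.
import Mathlib
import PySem

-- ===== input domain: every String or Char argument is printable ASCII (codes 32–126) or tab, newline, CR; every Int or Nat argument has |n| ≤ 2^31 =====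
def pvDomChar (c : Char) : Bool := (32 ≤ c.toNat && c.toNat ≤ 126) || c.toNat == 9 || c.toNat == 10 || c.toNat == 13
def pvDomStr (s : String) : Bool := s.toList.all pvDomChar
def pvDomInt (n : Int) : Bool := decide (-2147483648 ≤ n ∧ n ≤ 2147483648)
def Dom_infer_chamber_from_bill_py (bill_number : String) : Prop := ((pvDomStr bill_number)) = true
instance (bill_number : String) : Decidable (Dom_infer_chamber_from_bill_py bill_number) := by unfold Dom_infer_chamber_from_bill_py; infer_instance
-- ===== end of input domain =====

-- B replaces the two prefix-tuple loops with a single first-character test ('S'/'H'); simpler, same result.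
-- ===== PORT A =====
def SENATE_PREFIXES : List String := ["SENATE", "SJR", "SCR", "SB", "SR", "SC", "SJ", "SS", "S"]
def HOUSE_PREFIXES : List String := ["HOUSE", "HJR", "HCR", "HB", "HR", "HC", "HJ", "HS", "H"]

-- the 'for prefix in …: if token.startswith(prefix): return …' loop, one recursion step per iteration
def prefixLoop (token : String) : List String → Bool
  | [] => false
  | p :: ps => if PySem.Str.startswith token p then true else prefixLoop token ps

def infer_chamber_from_bill_py (bill_number : String) : String :=
  let token := PySem.Str.upper (PySem.Str.strip bill_number)
  if token = "" then ""
  else if prefixLoop token SENATE_PREFIXES then "Senate"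
  else if prefixLoop token HOUSE_PREFIXES then "House"
  else ""

-- ===== PORT B =====
def infer_chamber_from_bill_py_alt (bill_number : String) : String :=
  let token := PySem.Str.upper (PySem.Str.strip bill_number)
  match token.toList with
  | [] => ""
  | head :: _ =>
    if head = 'S' then "Senate"
    else if head = 'H' then "House"
    else ""

-- ===== PRECONDITION & SPEC =====
def Spec_infer_chamber_from_bill_py (bill_number : String) (out : String) : Prop := out = infer_chamber_from_bill_py_alt bill_number
instance (bill_number : String) (out : String) : Decidable (Spec_infer_chamber_from_bill_py bill_number out) := by unfold Spec_infer_chamber_from_bill_py; infer_instance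

-- ===== CLAIM (what is proved, stated in full; the proofs are below) =====
def Claim_equal_infer_chamber_from_bill_py : Prop := ∀ (bill_number : String), Dom_infer_chamber_from_bill_py bill_number → Spec_infer_chamber_from_bill_py bill_number (infer_chamber_from_bill_py bill_number)

-- ===== LEMMAS AND PROOFS =====

-- ===== VERDICT (by name: the statement is the Claim_ definition above) =====
-- the for-loop is an "any" over the prefix list
lemma prefixLoop_eq_true_iff (t : String) (L : List String) :
    prefixLoop t L = true ↔ ∃ p ∈ L, PySem.Str.startswith t p = true := by
  induction L with
  | nil => simp [prefixLoop]
  | cons p ps ih =>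
    simp only [prefixLoop, PySem.Str.startswith_eq]
    by_cases h : PySem.Chars.startswith t.toList p.toList = true
    · simp [h]
    · simp [h, ih, PySem.Str.startswith_eq]

-- on a nonempty token the loop result is exactly "first character = x", provided every
-- prefix in the list starts with x and the one-character prefix [x] is itself in the list
lemma prefixLoop_head (t : String) (c : Char) (rest : List Char) (x : Char)
    (L : List String) (ht : t.toList = c :: rest)
    (hL : ∀ p ∈ L, p.toList.head? = some x) (hx : ∃ p ∈ L, p.toList = [x]) :
    prefixLoop t L = (c == x) := by
  by_cases hc : c = x
  · obtain ⟨p, hp, hpx⟩ := hx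
    have hsw : PySem.Str.startswith t p = true := by
      rw [PySem.Str.startswith_eq, PySem.Chars.startswith_iff, ht, hpx, hc]
      exact ⟨rest, rfl⟩
    rw [(prefixLoop_eq_true_iff t L).mpr ⟨p, hp, hsw⟩]
    simp [hc]
  · have hfalse : prefixLoop t L = false := by
      rw [← Bool.not_eq_true, prefixLoop_eq_true_iff]
      rintro ⟨p, hp, hsw⟩
      have hhead := hL p hp
      obtain ⟨q, hq⟩ : ∃ q, p.toList = x :: q := by
        cases hpt : p.toList with
        | nil => rw [hpt] at hhead; simp at hhead
        | cons a as =>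
          rw [hpt] at hhead
          simp only [List.head?_cons, Option.some.injEq] at hhead
          exact ⟨as, by rw [hhead]⟩
      rw [PySem.Str.startswith_eq, PySem.Chars.startswith_iff, ht, hq] at hsw
      exact hc (List.cons_prefix_cons.mp hsw).1.symm
    rw [hfalse]
    simp [hc]

lemma senate_loop (c : Char) (rest : List Char) (t : String) (ht : t.toList = c :: rest) :
    prefixLoop t SENATE_PREFIXES = (c == 'S') :=
  prefixLoop_head t c rest 'S' _ ht (by decide) ⟨"S", by decide, by decide⟩

lemma house_loop (c : Char) (rest : List Char) (t : String) (ht : t.toList = c :: rest) :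
    prefixLoop t HOUSE_PREFIXES = (c == 'H') :=
  prefixLoop_head t c rest 'H' _ ht (by decide) ⟨"H", by decide, by decide⟩

theorem infer_chamber_from_bill_py_spec : Claim_equal_infer_chamber_from_bill_py := by
  intro s _
  simp only [Spec_infer_chamber_from_bill_py, infer_chamber_from_bill_py,
    infer_chamber_from_bill_py_alt]
  by_cases h0 : PySem.Str.upper (PySem.Str.strip s) = ""
  · rw [if_pos h0, h0]
    simp
  · rw [if_neg h0]
    cases ht : (PySem.Str.upper (PySem.Str.strip s)).toList with
    | nil =>
      refine absurd ?_ h0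
      have h2 := congrArg String.ofList ht
      rw [String.ofList_toList] at h2
      exact h2
    | cons c rest =>
      rw [senate_loop c rest _ ht, house_loop c rest _ ht]
      by_cases hS : c = 'S' <;> by_cases hH : c = 'H' <;> simp [hS, hH]
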